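-- pv_equiv track=rewrite | github.com/ThePythonator/Advent-of-Code | 2024/Day 17/hacky.py | _solve
-- ===== SOURCE A (Python) =====
-- def _solve(reg_a, target):
--     reg_b = 0
--     output_idx = 0
--     output = []
--     while True:
--         reg_b = (reg_a % 8) ^ 3
--         reg_b ^= (reg_a >> reg_b) ^ 5
--         reg_a >>= 3
--         if output_idx >= len(target) or target[output_idx] != reg_b % 8:
--             return False
--         output.append(reg_b % 8)
--         output_idx += 1
--         if reg_a == 0:
--             return output_idx == len(target)
-- ===== SOURCE B (Python) =====
-- def _digit(a):
--     b = (a % 8) ^ 3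
--     return (b ^ ((a >> b) ^ 5)) % 8
--
--
-- def _solve(reg_a, target):
--     # Index-based check: after i steps the machine's register is exactly
--     # reg_a >> (3*i), so each output digit is computable directly per index,
--     # and the loop-termination condition becomes arithmetic on shifts:
--     # the run halts after exactly n steps iff reg_a >> 3n == 0 but (for n > 1)
--     # reg_a >> 3(n-1) != 0.
--     n = len(target)
--     if n == 0:
--         return False
--     if reg_a >> (3 * n) != 0:
--         return False
--     if n > 1 and reg_a >> (3 * (n - 1)) == 0:
--         return False
--     return all(_digit(reg_a >> (3 * i)) == target[i] for i in range(n))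
-- ===== Notes on version B (the rewrite author's own statement) =====
-- stated objective: alternative
-- what changed: B replaces A's sequential state-machine loop by an index-based formulation: digit i is computed directly from reg_a >> 3i (the register after i steps), the halting point is decided up front by two closed-form shift tests (reg_a >> 3n == 0 and, for n > 1, reg_a >> 3(n-1) != 0), and the digits are then checked with a single all() over range(n).
import Mathlib
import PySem

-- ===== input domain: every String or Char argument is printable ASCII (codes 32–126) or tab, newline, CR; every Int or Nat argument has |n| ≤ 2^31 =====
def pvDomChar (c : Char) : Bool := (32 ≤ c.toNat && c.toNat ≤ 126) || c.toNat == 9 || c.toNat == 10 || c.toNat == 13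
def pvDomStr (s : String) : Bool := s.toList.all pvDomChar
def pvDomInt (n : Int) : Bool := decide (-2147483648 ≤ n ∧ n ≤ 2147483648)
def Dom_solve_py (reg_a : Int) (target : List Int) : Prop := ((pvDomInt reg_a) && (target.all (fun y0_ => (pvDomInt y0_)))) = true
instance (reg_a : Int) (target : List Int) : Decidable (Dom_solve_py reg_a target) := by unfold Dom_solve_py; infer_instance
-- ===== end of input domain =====

-- B replaces A's sequential simulation loop by an index-based check: digit i is computed
-- directly from reg_a >> 3i and the halting point is decided by two shift tests (alternative
-- decomposition, same cost).


-- ===== PORT A =====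
-- A's loop body: from reg_a compute (new reg_a, reg_b % 8).  The shift amount
-- (reg_a % 8) ^ 3 is always in 0..7, so '.toNat' on it is exact; Int's '>>>' with a
-- Nat count floors exactly like Python's '>>'.
def pvStepA (reg_a : Int) : Int × Int :=
  let b1 := PySem.Int.bxor (PySem.Int.mod reg_a 8) 3
  let b2 := PySem.Int.bxor b1 (PySem.Int.bxor (reg_a >>> b1.toNat) 5)
  (reg_a >>> (3 : Nat), PySem.Int.mod b2 8)

-- A's while-True loop; state (reg_a, output_idx); terminates because each pass either
-- returns or increments output_idx, and output_idx ≥ target.length returns False.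
-- (A's 'output' list is write-only dead state and is not carried.)
def solve_py_go (reg_a : Int) (target : List Int) (idx : Nat) : Bool :=
  if h : idx < target.length then
    if target[idx] ≠ (pvStepA reg_a).2 then false
    else if (pvStepA reg_a).1 = 0 then decide (idx + 1 = target.length)
    else solve_py_go (pvStepA reg_a).1 target (idx + 1)
  else false
termination_by target.length - idx

def solve_py (reg_a : Int) (target : List Int) : Bool :=
  solve_py_go reg_a target 0

-- ===== PORT B =====
-- Source B's _digit helper.
def pvDigit (a : Int) : Int :=
  let b := PySem.Int.bxor (PySem.Int.mod a 8) 3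
  PySem.Int.mod (PySem.Int.bxor b (PySem.Int.bxor (a >>> b.toNat) 5)) 8

-- Source B: early-return guard chain, then 'all(... for i in range(n))'.
-- Python's target[i] with 0 ≤ i < n is exactly getD i 0 here.
def solve_py_alt (reg_a : Int) (target : List Int) : Bool :=
  if target.length = 0 then false
  else if reg_a >>> (3 * target.length) ≠ 0 then false
  else if target.length > 1 ∧ reg_a >>> (3 * (target.length - 1)) = 0 then false
  else (List.range target.length).all
    (fun i => pvDigit (reg_a >>> (3 * i)) == target.getD i 0)

-- ===== PRECONDITION & SPEC =====
def Spec_solve_py (reg_a : Int) (target : List Int) (out : Bool) : Prop := out = solve_py_alt reg_a target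
instance (reg_a : Int) (target : List Int) (out : Bool) : Decidable (Spec_solve_py reg_a target out) := by unfold Spec_solve_py; infer_instance

-- ===== CLAIM (what is proved, stated in full; the proofs are below) =====
def Claim_equal_solve_py : Prop := ∀ (reg_a : Int) (target : List Int), Dom_solve_py reg_a target → Spec_solve_py reg_a target (solve_py reg_a target)

-- ===== LEMMAS AND PROOFS =====

theorem shiftR_comp (a : Int) (m n : Nat) : (a >>> m) >>> n = a >>> (m + n) := by
  simp [Int.shiftRight_eq_div_pow, Int.ediv_ediv_eq_ediv_mul, pow_add]

theorem shiftR_zero (a : Int) : a >>> (0 : Nat) = a := by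
  simp [Int.shiftRight_eq_div_pow]

-- the two ports share the digit recurrence
theorem stepA_snd (a : Int) : (pvStepA a).2 = pvDigit a := rfl

theorem stepA_fst (a : Int) (i : Nat) :
    (pvStepA (a >>> (3 * i))).1 = a >>> (3 * (i + 1)) := by
  show (a >>> (3 * i)) >>> (3 : Nat) = _
  rw [shiftR_comp]; ring_nf

-- the loop-state characterisation: from index idx with register a = reg_a >> 3·idx,
-- A's loop returns true iff every remaining digit matches and the register first
-- vanishes exactly at step n.
def pvP (reg_a : Int) (target : List Int) (idx : Nat) : Prop :=
  (∀ i, idx ≤ i → i < target.length → pvDigit (reg_a >>> (3 * i)) = target.getD i 0)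
  ∧ reg_a >>> (3 * target.length) = 0
  ∧ (idx = target.length - 1 ∨ reg_a >>> (3 * (target.length - 1)) ≠ 0)

theorem go_iff (reg_a : Int) (target : List Int) (idx : Nat) (hidx : idx < target.length) :
    solve_py_go (reg_a >>> (3 * idx)) target idx = true ↔ pvP reg_a target idx := by
  rw [solve_py_go, dif_pos hidx]
  rw [stepA_snd, stepA_fst]
  by_cases hm : pvDigit (reg_a >>> (3 * idx)) = target.getD idx 0
  · have hg : target[idx] = target.getD idx 0 := (List.getD_eq_getElem _ _ hidx).symm
    rw [if_neg (by simp [hg, hm])]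
    by_cases hz : reg_a >>> (3 * (idx + 1)) = 0
    · rw [if_pos hz]
      constructor
      · intro ht
        have hn : idx + 1 = target.length := by simpa using ht
        refine ⟨?_, ?_, Or.inl (by omega)⟩
        · intro i h1 h2
          have : i = idx := by omega
          simpa [this] using hm
        · rw [← hn]; exact hz
      · intro ⟨_, h2, h3⟩
        simp only [decide_eq_true_eq]
        by_cases hn : idx + 1 = target.length
        · exact hn
        · -- idx + 1 < target.length: the third conjunct of pvP fails, register already 0
          exfalso
          rcases h3 with h3 | h3
          · omega
          · apply h3
            have : reg_a >>> (3 * (target.length - 1))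
                = (reg_a >>> (3 * (idx + 1))) >>> (3 * (target.length - 1) - 3 * (idx + 1)) := by
              rw [shiftR_comp]
              congr 1
              omega
            rw [this, hz]
            simp [Int.shiftRight_eq_div_pow]
    · rw [if_neg hz]
      by_cases hlast : idx + 1 < target.length
      · rw [go_iff reg_a target (idx + 1) hlast]
        unfold pvP
        constructor
        · intro ⟨h1, h2, h3⟩
          refine ⟨?_, h2, ?_⟩
          · intro i hi hlen
            rcases Nat.eq_or_lt_of_le hi with he | hl
            · simpa [← he] using hm
            · exact h1 i hl hlen
          · rcases h3 with h3 | h3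
            · right
              have : target.length - 1 = idx + 1 := by omega
              rw [this]; exact hz
            · exact Or.inr h3
        · intro ⟨h1, h2, h3⟩
          refine ⟨fun i hi hlen => h1 i (by omega) hlen, h2, ?_⟩
          rcases h3 with h3 | h3
          · exact absurd h3 (by omega)
          · exact Or.inr h3
      · -- idx + 1 = target.length but register not yet 0: A recurses once more and fails;
        -- pvP's second conjunct fails too.
        have hn : idx + 1 = target.length := by omega
        rw [solve_py_go, dif_neg (by omega)]
        constructor
        · intro hf; exact absurd hf (by simp)
        · intro ⟨_, h2, _⟩
          rw [← hn] at h2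
          exact absurd h2 hz
  · have hg : target[idx] = target.getD idx 0 := (List.getD_eq_getElem _ _ hidx).symm
    rw [if_pos (fun he => hm (he.symm.trans hg))]
    constructor
    · intro hf; exact absurd hf (by simp)
    · intro ⟨h1, _, _⟩
      exact absurd (h1 idx le_rfl hidx) hm
termination_by target.length - idx

theorem alt_iff (reg_a : Int) (target : List Int) (h : target ≠ []) :
    solve_py_alt reg_a target = true ↔ pvP reg_a target 0 := by
  have hn : 0 < target.length := List.length_pos_iff.mpr h
  unfold solve_py_alt pvP
  rw [if_neg (by omega)]
  by_cases h2 : reg_a >>> (3 * target.length) = 0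
  · rw [if_neg (by simpa using h2)]
    by_cases h3 : target.length > 1 ∧ reg_a >>> (3 * (target.length - 1)) = 0
    · rw [if_pos h3]
      constructor
      · intro hf; exact absurd hf (by simp)
      · intro ⟨_, _, hc⟩
        rcases hc with hc | hc
        · exact absurd hc (by omega)
        · exact absurd h3.2 hc
    · rw [if_neg h3]
      rw [List.all_eq_true]
      constructor
      · intro hall
        refine ⟨fun i _ hi => by simpa using hall i (List.mem_range.mpr hi), h2, ?_⟩
        by_cases hl : target.length = 1
        · exact Or.inl (by omega)
        · exact Or.inr (fun hz => h3 ⟨by omega, hz⟩)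
      · intro ⟨h1, _, _⟩ i hi
        simpa using h1 i (Nat.zero_le _) (List.mem_range.mp hi)
  · rw [if_pos (by simpa using h2)]
    constructor
    · intro hf; exact absurd hf (by simp)
    · intro ⟨_, hc, _⟩
      exact absurd hc h2

-- ===== VERDICT (by name: the statement is the Claim_ definition above) =====
theorem solve_py_spec : Claim_equal_solve_py := by
  intro reg_a target _
  unfold Spec_solve_py solve_py
  cases target with
  | nil =>
      rw [solve_py_go, dif_neg (by simp)]
      rfl
  | cons x xs =>
      rw [Bool.eq_iff_iff]
      have hgo := go_iff reg_a (x :: xs) 0 (by simp)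
      norm_num [shiftR_zero] at hgo
      rw [hgo, alt_iff reg_a (x :: xs) (by simp)]
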